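-- pv_equiv track=rewrite | github.com/gonggorithm/algorithmStudy | 0702/dan-1388.py | check_in_col
-- ===== SOURCE A (Python) =====
-- def check_in_col(a, n, m):
--     col_cnt = 0
--     link = 0
--
--
--     for j in range(m):
--         for i in range(n):
--             if a[i][j] == "|":
--                 link = 1
--                 if i == n - 1:
--                     col_cnt += 1
--                     link = 0
--             else:
--                 if link == 1:
--                     col_cnt += 1
--                     link = 0
--
--     return col_cnt
-- ===== SOURCE B (Python) =====
-- def check_in_col(a, n, m):
--     pipes = sum(1 for j in range(m) for i in range(n) if a[i][j] == "|")
--     pairs = sum(1 for j in range(m) for i in range(1, n)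
--                 if a[i][j] == "|" and a[i - 1][j] == "|")
--     return pipes - pairs
-- ===== Notes on version B (the rewrite author's own statement) =====
-- stated objective: alternative
-- what changed: Replaces A's stateful run-end detection by the arithmetic identity runs = (#'|' cells) - (#vertically adjacent '|' pairs), computed in two independent stateless scans and subtracted.
import Mathlib
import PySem

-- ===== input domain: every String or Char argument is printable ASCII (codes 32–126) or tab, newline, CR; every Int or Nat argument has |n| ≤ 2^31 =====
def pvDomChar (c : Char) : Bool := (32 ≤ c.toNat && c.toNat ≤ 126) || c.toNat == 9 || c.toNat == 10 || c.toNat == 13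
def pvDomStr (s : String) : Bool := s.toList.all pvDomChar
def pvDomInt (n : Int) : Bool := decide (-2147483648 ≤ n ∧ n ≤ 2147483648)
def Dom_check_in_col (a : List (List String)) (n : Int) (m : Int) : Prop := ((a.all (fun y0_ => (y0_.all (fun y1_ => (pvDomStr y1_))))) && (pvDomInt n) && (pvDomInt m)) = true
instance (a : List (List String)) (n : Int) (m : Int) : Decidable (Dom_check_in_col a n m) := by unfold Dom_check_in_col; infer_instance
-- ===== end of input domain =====

-- B drops A's run-in-progress flag entirely and counts runs by the identity
-- runs = (#'|' cells) - (#vertically adjacent '|' pairs), in two stateless scans (objective: alternative).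

-- a[i][j]; the default "" is only reached outside Pre_check_in_col
def pvCell (a : List (List String)) (i j : Int) : String :=
  PySem.List.pyGetD (PySem.List.pyGetD a i []) j ""

-- ===== PORT A =====
def check_in_col (a : List (List String)) (n : Int) (m : Int) : Int :=
  (((PySem.List.pyRange 0 m 1).foldl (fun (st : Int × Int) j =>
    (PySem.List.pyRange 0 n 1).foldl (fun (st : Int × Int) i =>
      if pvCell a i j = "|" then
        if i = n - 1 then (st.1 + 1, 0) else (st.1, 1)
      else
        if st.2 = 1 then (st.1 + 1, 0) else (st.1, 0)) st) ((0 : Int), (0 : Int))) : Int × Int).1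

-- ===== PORT B =====
def check_in_col_alt (a : List (List String)) (n : Int) (m : Int) : Int :=
  let pipes : Int := (PySem.List.pyRange 0 m 1).foldl (fun (c : Int) j =>
    (PySem.List.pyRange 0 n 1).foldl (fun (c : Int) i =>
      if pvCell a i j = "|" then c + 1 else c) c) 0
  let pairs : Int := (PySem.List.pyRange 0 m 1).foldl (fun (c : Int) j =>
    (PySem.List.pyRange 1 n 1).foldl (fun (c : Int) i =>
      if pvCell a i j = "|" ∧ pvCell a (i - 1) j = "|" then c + 1 else c) c) 0
  pipes - pairs

-- ===== PRECONDITION & SPEC =====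
-- Pre_: exactly the inputs where Python A returns (no IndexError): either a loop is
-- empty (m ≤ 0 or n ≤ 0) or all cells a[i][j] for i < n, j < m exist.
def Pre_check_in_col (a : List (List String)) (n : Int) (m : Int) : Prop :=
  m ≤ 0 ∨ n ≤ 0 ∨ (n ≤ a.length ∧ ∀ row ∈ a.take n.toNat, m ≤ row.length)
instance (a : List (List String)) (n : Int) (m : Int) : Decidable (Pre_check_in_col a n m) := by unfold Pre_check_in_col; infer_instance

def pvWitness_check_in_col : List (List String) × Int × Int :=
  ([["|", "."], [".", "|"], ["|", "|"]], 3, 2)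

def Spec_check_in_col (a : List (List String)) (n : Int) (m : Int) (out : Int) : Prop := out = check_in_col_alt a n m
instance (a : List (List String)) (n : Int) (m : Int) (out : Int) : Decidable (Spec_check_in_col a n m out) := by unfold Spec_check_in_col; infer_instance

-- ===== CLAIM (what is proved, stated in full; the proofs are below) =====
def Claim_equal_check_in_col : Prop := ∀ (a : List (List String)) (n : Int) (m : Int), Dom_check_in_col a n m → Pre_check_in_col a n m → Spec_check_in_col a n m (check_in_col a n m)

-- ===== LEMMAS AND PROOFS =====

-- shorthand predicates used only in the proofs
def pvStartP (cell : Int → String) : Int → Bool :=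
  fun i => decide (cell i = "|" ∧ (i = 0 ∨ cell (i - 1) ≠ "|"))
def pvPipeP (cell : Int → String) : Int → Bool := fun i => decide (cell i = "|")
def pvPairP (cell : Int → String) : Int → Bool :=
  fun i => decide (cell i = "|" ∧ cell (i - 1) = "|")

-- run-start fold shifts by a constant
theorem pvB_shift (cell : Int → String) :
    ∀ (l : List Int) (c d : Int),
      l.foldl (fun (cnt : Int) i => if cell i = "|" ∧ (i = 0 ∨ cell (i - 1) ≠ "|") then cnt + 1 else cnt) (c + d)
        = l.foldl (fun (cnt : Int) i => if cell i = "|" ∧ (i = 0 ∨ cell (i - 1) ≠ "|") then cnt + 1 else cnt) c + d := by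
  intro l
  induction l with
  | nil => intro c d; simp
  | cons x xs ih =>
      intro c d
      simp only [List.foldl_cons]
      by_cases h : cell x = "|" ∧ (x = 0 ∨ cell (x - 1) ≠ "|")
      · rw [if_pos h, if_pos h, show c + d + 1 = (c + 1) + d by ring, ih]
      · rw [if_neg h, if_neg h, ih]

-- the incoming 'link' value when A's inner loop is about to process row k
def pvLink (cell : Int → String) (n k : Int) : Int :=
  if 0 < k ∧ k < n ∧ cell (k - 1) = "|" then 1 else 0

-- column invariant: A's run-end count from state (c, link) equals the run-start count plus link
theorem pvCol (cell : Int → String) (n : Int) :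
    ∀ (fuel : Nat) (k : Int), 0 ≤ k → k ≤ n → (n - k).toNat ≤ fuel → ∀ c : Int,
      (PySem.List.pyRange k n 1).foldl (fun (st : Int × Int) i =>
        if cell i = "|" then
          if i = n - 1 then (st.1 + 1, 0) else (st.1, 1)
        else
          if st.2 = 1 then (st.1 + 1, 0) else (st.1, 0)) (c, pvLink cell n k)
      = ((PySem.List.pyRange k n 1).foldl (fun (cnt : Int) i =>
          if cell i = "|" ∧ (i = 0 ∨ cell (i - 1) ≠ "|") then cnt + 1 else cnt) c
         + pvLink cell n k, 0) := by
  intro fuel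
  induction fuel with
  | zero =>
      intro k hk0 hkn hf c
      have hnk : n ≤ k := by omega
      rw [PySem.List.pyRange_one_eq_nil hnk]
      have hL : pvLink cell n k = 0 := by unfold pvLink; rw [if_neg]; omega
      rw [hL]; simp
  | succ fuel ih =>
      intro k hk0 hkn hf c
      by_cases hlt : k < n
      · rw [PySem.List.pyRange_one_cons hlt]
        simp only [List.foldl_cons]
        by_cases hq : 0 < k ∧ k < n ∧ cell (k - 1) = "|"
        · -- a run is in progress entering row k
          have hL : pvLink cell n k = 1 := by unfold pvLink; rw [if_pos hq]
          have hB : ¬ (cell k = "|" ∧ (k = 0 ∨ cell (k - 1) ≠ "|")) := by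
            intro h
            rcases h.2 with h2 | h2
            · omega
            · exact h2 hq.2.2
          rw [hL, if_neg hB]
          by_cases hp : cell k = "|"
          · rw [if_pos hp]
            by_cases hb : k = n - 1
            · rw [if_pos hb]
              rw [PySem.List.pyRange_one_eq_nil (show n ≤ k + 1 by omega)]
              simp
            · rw [if_neg hb]
              have hL1 : pvLink cell n (k + 1) = 1 := by
                unfold pvLink
                rw [if_pos ⟨by omega, by omega, by simpa using hp⟩]
              have h1 := ih (k + 1) (by omega) (by omega) (by omega) c
              rw [hL1] at h1
              rw [h1]
          · rw [if_neg hp, if_pos rfl]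
            have hL0 : pvLink cell n (k + 1) = 0 := by
              unfold pvLink
              rw [if_neg]; intro h; exact hp (by simpa using h.2.2)
            have h1 := ih (k + 1) (by omega) (by omega) (by omega) (c + 1)
            rw [hL0, add_zero] at h1
            rw [h1, show c + 1 = c + 1 from rfl]
            rw [pvB_shift cell (PySem.List.pyRange (k + 1) n 1) c 1]
        · -- no run in progress entering row k
          have hL : pvLink cell n k = 0 := by unfold pvLink; rw [if_neg hq]
          rw [hL]
          by_cases hp : cell k = "|"
          · have hB : cell k = "|" ∧ (k = 0 ∨ cell (k - 1) ≠ "|") := by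
              refine ⟨hp, ?_⟩
              by_cases hk : k = 0
              · exact Or.inl hk
              · exact Or.inr (fun hcc => hq ⟨by omega, hlt, hcc⟩)
            rw [if_pos hB, if_pos hp]
            by_cases hb : k = n - 1
            · rw [if_pos hb]
              rw [PySem.List.pyRange_one_eq_nil (show n ≤ k + 1 by omega)]
              simp
            · rw [if_neg hb]
              have hL1 : pvLink cell n (k + 1) = 1 := by
                unfold pvLink
                rw [if_pos ⟨by omega, by omega, by simpa using hp⟩]
              have h1 := ih (k + 1) (by omega) (by omega) (by omega) c
              rw [hL1] at h1
              rw [h1, pvB_shift cell (PySem.List.pyRange (k + 1) n 1) c 1]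
              simp
          · have hB : ¬ (cell k = "|" ∧ (k = 0 ∨ cell (k - 1) ≠ "|")) := fun h => hp h.1
            rw [if_neg hB, if_neg hp, if_neg (by decide : ¬ (0 : Int) = 1)]
            have hL0 : pvLink cell n (k + 1) = 0 := by
              unfold pvLink
              rw [if_neg]; intro h; exact hp (by simpa using h.2.2)
            have h1 := ih (k + 1) (by omega) (by omega) (by omega) c
            rw [hL0, add_zero] at h1
            rw [h1, add_zero]
      · have hnk : n ≤ k := by omega
        rw [PySem.List.pyRange_one_eq_nil hnk]
        have hL : pvLink cell n k = 0 := by unfold pvLink; rw [if_neg]; omega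
        rw [hL]; simp

-- per column, from link 0: A's state map equals the run-start count with final link 0
theorem pvColZero (a : List (List String)) (n j : Int) (c : Int) :
    (PySem.List.pyRange 0 n 1).foldl (fun (st : Int × Int) i =>
        if pvCell a i j = "|" then
          if i = n - 1 then (st.1 + 1, 0) else (st.1, 1)
        else
          if st.2 = 1 then (st.1 + 1, 0) else (st.1, 0)) (c, 0)
    = ((PySem.List.pyRange 0 n 1).foldl (fun (cnt : Int) i =>
        if pvCell a i j = "|" ∧ (i = 0 ∨ pvCell a (i - 1) j ≠ "|") then cnt + 1 else cnt) c, 0) := by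
  by_cases hn : 0 ≤ n
  · have h := pvCol (fun i => pvCell a i j) n n.toNat 0 (by omega) hn (by omega) c
    have hL : pvLink (fun i => pvCell a i j) n 0 = 0 := by unfold pvLink; simp
    rw [hL] at h
    simpa using h
  · rw [PySem.List.pyRange_one_eq_nil (by omega)]
    simp

-- outer loop of A reduced to the run-start sum
theorem pvOuter (a : List (List String)) (n : Int) :
    ∀ (js : List Int) (c : Int),
      js.foldl (fun (st : Int × Int) j =>
        (PySem.List.pyRange 0 n 1).foldl (fun (st : Int × Int) i =>
          if pvCell a i j = "|" then
            if i = n - 1 then (st.1 + 1, 0) else (st.1, 1)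
          else
            if st.2 = 1 then (st.1 + 1, 0) else (st.1, 0)) st) (c, 0)
      = (js.foldl (fun (cnt : Int) j =>
          (PySem.List.pyRange 0 n 1).foldl (fun (cnt : Int) i =>
            if pvCell a i j = "|" ∧ (i = 0 ∨ pvCell a (i - 1) j ≠ "|") then cnt + 1 else cnt) cnt) c, 0) := by
  intro js
  induction js with
  | nil => intro c; simp
  | cons j js ih =>
      intro c
      simp only [List.foldl_cons]
      rw [pvColZero a n j c, ih]

-- on a list avoiding 0, start-count = pipe-count − pair-count
theorem pvListIdent (cell : Int → String) :
    ∀ l : List Int, (∀ x ∈ l, x ≠ 0) →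
      (l.countP (pvStartP cell) : Int) = (l.countP (pvPipeP cell) : Int) - (l.countP (pvPairP cell) : Int) := by
  intro l
  induction l with
  | nil => intro _; simp
  | cons x xs ih =>
      intro h
      have hx : x ≠ 0 := h x (by simp)
      have hxs := ih (fun y hy => h y (by simp [hy]))
      simp only [List.countP_cons]
      by_cases hp : cell x = "|"
      · by_cases hq : cell (x - 1) = "|"
        · have h1 : pvStartP cell x = false := by
            simp [pvStartP, hp, hq, hx]
          have h2 : pvPipeP cell x = true := by simp [pvPipeP, hp]
          have h3 : pvPairP cell x = true := by simp [pvPairP, hp, hq]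
          simp [h1, h2, h3]; omega
        · have h1 : pvStartP cell x = true := by simp [pvStartP, hp, hq]
          have h2 : pvPipeP cell x = true := by simp [pvPipeP, hp]
          have h3 : pvPairP cell x = false := by simp [pvPairP, hp, hq]
          simp [h1, h2, h3]; omega
      · have h1 : pvStartP cell x = false := by simp [pvStartP, hp]
        have h2 : pvPipeP cell x = false := by simp [pvPipeP, hp]
        have h3 : pvPairP cell x = false := by simp [pvPairP, hp]
        simp [h1, h2, h3]; omega

-- per column: run-start count over 0..n = pipe count over 0..n − pair count over 1..n
theorem pvColIdent (cell : Int → String) (n : Int) :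
    ((PySem.List.pyRange 0 n 1).countP (pvStartP cell) : Int)
      = ((PySem.List.pyRange 0 n 1).countP (pvPipeP cell) : Int)
        - ((PySem.List.pyRange 1 n 1).countP (pvPairP cell) : Int) := by
  by_cases hn : 0 < n
  · rw [PySem.List.pyRange_one_cons hn]
    have hne : ∀ x ∈ PySem.List.pyRange 1 n 1, x ≠ 0 := by
      intro x hx
      have := (PySem.List.mem_pyRange_one.mp hx).1
      omega
    simp only [List.countP_cons, zero_add]
    have h0s : pvStartP cell 0 = pvPipeP cell 0 := by
      by_cases hp : cell 0 = "|" <;> simp [pvStartP, pvPipeP, hp]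
    push_cast
    rw [h0s, pvListIdent cell _ hne]
    ring
  · rw [PySem.List.pyRange_one_eq_nil (by omega : n ≤ (0:Int)),
        PySem.List.pyRange_one_eq_nil (by omega : n ≤ (1:Int))]
    simp

-- Σ (P − Q) = Σ P − Σ Q
theorem pvSumSub (P Q : Int → Int) :
    ∀ js : List Int, (js.map (fun j => P j - Q j)).sum = (js.map P).sum - (js.map Q).sum := by
  intro js
  induction js with
  | nil => simp
  | cons j js ih => simp [ih]; ring

-- the three counting loops as countP sums
theorem pvStart_count (cell : Int → String) (l : List Int) (c : Int) :
    l.foldl (fun (cnt : Int) i => if cell i = "|" ∧ (i = 0 ∨ cell (i - 1) ≠ "|") then cnt + 1 else cnt) c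
      = c + (l.countP (pvStartP cell) : Int) := by
  rw [PySem.List.foldl_ite_add_one (p := fun i => cell i = "|" ∧ (i = 0 ∨ cell (i - 1) ≠ "|")) (l := l) (a := c)]
  congr 2

theorem pvPipe_count (cell : Int → String) (l : List Int) (c : Int) :
    l.foldl (fun (cnt : Int) i => if cell i = "|" then cnt + 1 else cnt) c
      = c + (l.countP (pvPipeP cell) : Int) := by
  rw [PySem.List.foldl_ite_add_one (p := fun i => cell i = "|") (l := l) (a := c)]
  congr 2

theorem pvPair_count (cell : Int → String) (l : List Int) (c : Int) :
    l.foldl (fun (cnt : Int) i => if cell i = "|" ∧ cell (i - 1) = "|" then cnt + 1 else cnt) c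
      = c + (l.countP (pvPairP cell) : Int) := by
  rw [PySem.List.foldl_ite_add_one (p := fun i => cell i = "|" ∧ cell (i - 1) = "|") (l := l) (a := c)]
  congr 2

-- a fold whose step adds S j per element is the sum of S
theorem pvFoldSum (inner : Int → Int → Int) (S : Int → Int)
    (h : ∀ c j, inner c j = c + S j) :
    ∀ (js : List Int) (c : Int), js.foldl inner c = c + (js.map S).sum := by
  intro js
  induction js with
  | nil => intro c; simp
  | cons j js ih =>
      intro c
      simp only [List.foldl_cons, List.map_cons, List.sum_cons]
      rw [h, ih]
      ring

-- ===== VERDICT (by name: the statement is the Claim_ definition above) =====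
theorem check_in_col_spec : Claim_equal_check_in_col := by
  intro a n m _ _
  unfold Spec_check_in_col check_in_col check_in_col_alt
  dsimp only
  rw [pvOuter a n (PySem.List.pyRange 0 m 1) 0]
  dsimp only
  rw [pvFoldSum _ (fun j => ((PySem.List.pyRange 0 n 1).countP (pvStartP (fun i => pvCell a i j)) : Int))
      (fun c j => pvStart_count (fun i => pvCell a i j) (PySem.List.pyRange 0 n 1) c)]
  rw [pvFoldSum _ (fun j => ((PySem.List.pyRange 0 n 1).countP (pvPipeP (fun i => pvCell a i j)) : Int))
      (fun c j => pvPipe_count (fun i => pvCell a i j) (PySem.List.pyRange 0 n 1) c)]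
  rw [pvFoldSum _ (fun j => ((PySem.List.pyRange 1 n 1).countP (pvPairP (fun i => pvCell a i j)) : Int))
      (fun c j => pvPair_count (fun i => pvCell a i j) (PySem.List.pyRange 1 n 1) c)]
  simp only [zero_add]
  have hcong : ((PySem.List.pyRange 0 m 1).map
      (fun j => ((PySem.List.pyRange 0 n 1).countP (pvStartP (fun i => pvCell a i j)) : Int))) =
      ((PySem.List.pyRange 0 m 1).map (fun j =>
        ((PySem.List.pyRange 0 n 1).countP (pvPipeP (fun i => pvCell a i j)) : Int)
        - ((PySem.List.pyRange 1 n 1).countP (pvPairP (fun i => pvCell a i j)) : Int))) := by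
    apply List.map_congr_left
    intro j _
    exact pvColIdent (fun i => pvCell a i j) n
  rw [hcong, pvSumSub]
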